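-- pv_equiv track=rewrite | github.com/jinyoong/SWEA | problem/D4/3347. 올림픽 종목 투표.py | solution
-- ===== SOURCE A (Python) =====
-- def solution(event, group):
--     max_count = max_answer = 0
--     answer = [0] * len(event)
--     answer_dict = dict()
--
--     for i in range(len(group)):
--         if group[i] not in answer_dict.keys():
--             for j in range(len(event)):
--                 if event[j] <= group[i]:
--                     answer_dict[group[i]] = j
--                     answer[j] += 1
--                     if max_count < answer[j]:
--                         max_count = answer[j]
--                         max_answer = j
--                     break
--         else:
--             answer[answer_dict[group[i]]] += 1
--             if max_count < answer[answer_dict[group[i]]]: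
--                 max_count = answer[answer_dict[group[i]]]
--                 max_answer = answer_dict[group[i]]
--
--     return max_answer + 1
-- ===== SOURCE B (Python) =====
-- def solution(event, group):
--     picks = []
--     for g in group:
--         p = None
--         for j, cost in enumerate(event):
--             if cost <= g:
--                 p = j
--                 break
--         picks.append(p)
--     counts = [0] * len(event)
--     max_count = 0
--     max_answer = 0
--     for p in picks:
--         if p is not None:
--             counts[p] += 1
--             if max_count < counts[p]:
--                 max_count = counts[p]
--                 max_answer = p
--     return max_answer + 1
-- ===== Notes on version B (the rewrite author's own statement) =====
-- stated objective: simpler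
-- what changed: B replaces A's single loop with an interleaved memo dict by two plain passes: first compute each person's picked event index by a direct scan (no dict), then tally the picks in order with a running strict-max.
import Mathlib
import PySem

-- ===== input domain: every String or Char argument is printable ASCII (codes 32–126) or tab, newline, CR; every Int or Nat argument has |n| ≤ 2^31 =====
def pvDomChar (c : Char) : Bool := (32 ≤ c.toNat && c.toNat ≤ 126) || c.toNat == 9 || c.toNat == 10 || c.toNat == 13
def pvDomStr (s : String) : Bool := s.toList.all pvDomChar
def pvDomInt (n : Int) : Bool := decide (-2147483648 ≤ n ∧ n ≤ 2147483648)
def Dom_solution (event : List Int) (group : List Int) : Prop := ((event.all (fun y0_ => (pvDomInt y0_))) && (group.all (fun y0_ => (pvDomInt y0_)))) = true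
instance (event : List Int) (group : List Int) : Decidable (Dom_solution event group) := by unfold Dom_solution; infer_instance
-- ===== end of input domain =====

-- B drops A's memo dict: it computes each person's pick by a plain scan, then tallies in a second pass (objective: simpler).

-- ===== PORT A =====
-- inner loop 'for j in range(len(event)): if event[j] <= group[i]: …; break',
-- iterating the event list with its index j (same traversal as range over indices)
def solution_inner (evs : List Int) (j : Nat) (g : Int) (mc ma : Int)
    (ans : List Int) (d : PySem.Dict Int Nat) :
    Int × Int × List Int × PySem.Dict Int Nat :=
  match evs with
  | [] => (mc, ma, ans, d)
  | c :: rest =>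
    if c ≤ g then
      let d' := d.insert g j
      let ans' := ans.set j (ans.getD j 0 + 1)
      let cj := ans'.getD j 0
      if mc < cj then (cj, (j : Int), ans', d') else (mc, ma, ans', d')
    else solution_inner rest (j + 1) g mc ma ans d

-- outer loop 'for i in range(len(group))', state (max_count, max_answer, answer, answer_dict)
def solution_loop (event : List Int) (gs : List Int) (mc ma : Int)
    (ans : List Int) (d : PySem.Dict Int Nat) : Int :=
  match gs with
  | [] => ma
  | g :: rest =>
    match d.get? g with
    | none =>
      match solution_inner event 0 g mc ma ans d with
      | (mc', ma', ans', d') => solution_loop event rest mc' ma' ans' d'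
    | some j =>
      let ans' := ans.set j (ans.getD j 0 + 1)
      let cj := ans'.getD j 0
      if mc < cj then solution_loop event rest cj (j : Int) ans' d
      else solution_loop event rest mc ma ans' d

def solution (event : List Int) (group : List Int) : Int :=
  solution_loop event group 0 0 (List.replicate event.length 0) PySem.Dict.empty + 1

-- ===== PORT B =====
-- first pass: p = first index j with event[j] <= g, else None
def solution_pick (evs : List Int) (g : Int) : Option Nat :=
  match evs with
  | [] => none
  | c :: rest => if c ≤ g then some 0 else (solution_pick rest g).map (· + 1)

-- second pass: tally picks in order, running strict-max
def solution_count (picks : List (Option Nat)) (counts : List Int) (mc ma : Int) : Int :=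
  match picks with
  | [] => ma
  | none :: rest => solution_count rest counts mc ma
  | some p :: rest =>
    let counts' := counts.set p (counts.getD p 0 + 1)
    let cp := counts'.getD p 0
    if mc < cp then solution_count rest counts' cp (p : Int)
    else solution_count rest counts' mc ma

def solution_alt (event : List Int) (group : List Int) : Int :=
  solution_count (group.map (solution_pick event)) (List.replicate event.length 0) 0 0 + 1

-- ===== PRECONDITION & SPEC =====
def Spec_solution (event : List Int) (group : List Int) (out : Int) : Prop := out = solution_alt event group
instance (event : List Int) (group : List Int) (out : Int) : Decidable (Spec_solution event group out) := by unfold Spec_solution; infer_instance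

-- ===== CLAIM (what is proved, stated in full; the proofs are below) =====
def Claim_equal_solution : Prop := ∀ (event : List Int) (group : List Int), Dom_solution event group → Spec_solution event group (solution event group)

-- ===== LEMMAS AND PROOFS =====

-- A's inner scan computes B's pick (with offset) and performs the corresponding update
theorem solution_inner_eq (evs : List Int) (j : Nat) (g : Int) (mc ma : Int)
    (ans : List Int) (d : PySem.Dict Int Nat) :
    solution_inner evs j g mc ma ans d =
      match solution_pick evs g with
      | none => (mc, ma, ans, d)
      | some p =>
        let k := p + j
        let ans' := ans.set k (ans.getD k 0 + 1)
        let ck := ans'.getD k 0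
        ((if mc < ck then ck else mc), (if mc < ck then (k : Int) else ma),
          ans', d.insert g k) := by
  induction evs generalizing j with
  | nil => simp [solution_inner, solution_pick]
  | cons c rest ih =>
    by_cases h : c ≤ g
    · simp [solution_inner, solution_pick, h]
      split_ifs <;> rfl
    · simp only [solution_inner, solution_pick, if_neg h, ih]
      cases hp : solution_pick rest g with
      | none => simp
      | some p =>
        simp only [Option.map_some]
        have : p + 1 + j = p + (j + 1) := by omega
        rw [this]

-- invariant: every memoized entry of the dict is that key's pick
theorem solution_loop_eq (event : List Int) (gs : List Int) (mc ma : Int)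
    (ans : List Int) (d : PySem.Dict Int Nat)
    (hd : ∀ g j, d.get? g = some j → solution_pick event g = some j) :
    solution_loop event gs mc ma ans d =
      solution_count (gs.map (solution_pick event)) ans mc ma := by
  induction gs generalizing mc ma ans d with
  | nil => simp [solution_loop, solution_count]
  | cons g rest ih =>
    simp only [solution_loop, List.map_cons]
    cases hg : d.get? g with
    | none =>
      rw [solution_inner_eq]
      cases hp : solution_pick event g with
      | none => simpa [solution_count] using ih mc ma ans d hd
      | some p =>
        simp only [solution_count, Nat.add_zero]
        have hd' : ∀ g' j, (d.insert g p).get? g' = some j →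
            solution_pick event g' = some j := by
          intro g' j h
          rw [PySem.Dict.get?_insert] at h
          split_ifs at h with he
          · cases h; rw [he]; exact hp
          · exact hd g' j h
        split_ifs <;> exact ih _ _ _ _ hd'
    | some j =>
      have hp : solution_pick event g = some j := hd g j hg
      simp only [hp, solution_count]
      split_ifs <;> exact ih _ _ _ _ hd

theorem solution_spec' (event group : List Int) :
    solution event group = solution_alt event group := by
  unfold solution solution_alt
  rw [solution_loop_eq]
  intro g j h
  simp [PySem.Dict.get?, PySem.Dict.empty] at h

-- ===== VERDICT (by name: the statement is the Claim_ definition above) =====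
theorem solution_spec : Claim_equal_solution := by
  intro event group _
  exact solution_spec' event group
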